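-- pv_equiv track=rewrite | github.com/MateusAlcantara13/python-temperature-analysis | main.py | maior_menor_posicao
-- ===== SOURCE A (Python) =====
-- def maior_menor_posicao(lista):
--     """
--     Identifica a maior e a menor temperatura da lista.
--     Retorna também a posição (índice humano) desses valores.
--     """
--     maior_temp = lista[0]
--     menor_temp = lista[0]
--     pos_maior = 1
--     pos_menor = 1
--
--     for i, temp in enumerate(lista):
--         if temp > maior_temp:
--             maior_temp = temp
--             pos_maior = i + 1
--
--         if temp < menor_temp:
--             menor_temp = temp
--             pos_menor = i + 1
--
--     return maior_temp, menor_temp, pos_maior, pos_menor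
-- ===== SOURCE B (Python) =====
-- def maior_menor_posicao(lista):
--     """
--     Identifica a maior e a menor temperatura da lista.
--     Retorna também a posição (índice humano) desses valores.
--     """
--     maior_temp = max(lista)
--     menor_temp = min(lista)
--     return maior_temp, menor_temp, lista.index(maior_temp) + 1, lista.index(menor_temp) + 1
-- ===== Notes on version B (the rewrite author's own statement) =====
-- stated objective: idiomatic
-- what changed: Replaces the fused enumerate loop carrying four state variables with the standard-library max()/min() plus list.index() for the first-occurrence 1-based positions.
import Mathlib
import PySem

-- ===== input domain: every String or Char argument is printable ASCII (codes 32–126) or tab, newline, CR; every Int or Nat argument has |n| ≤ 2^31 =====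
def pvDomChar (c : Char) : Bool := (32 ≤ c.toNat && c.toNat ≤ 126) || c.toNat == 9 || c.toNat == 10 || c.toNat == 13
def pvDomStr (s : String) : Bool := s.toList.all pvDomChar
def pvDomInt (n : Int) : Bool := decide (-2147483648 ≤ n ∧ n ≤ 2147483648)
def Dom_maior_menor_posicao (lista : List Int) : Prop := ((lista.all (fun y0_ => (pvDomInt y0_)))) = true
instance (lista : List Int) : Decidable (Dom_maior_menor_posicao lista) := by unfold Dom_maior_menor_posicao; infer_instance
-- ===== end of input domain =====

-- B replaces A's fused four-variable scan with max()/min() plus list.index() for the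
-- first-occurrence 1-based positions (idiomatic; same asymptotic cost).


-- ===== PORT A =====
-- one loop step of A: update (maior, menor, pos_maior, pos_menor) with (i, temp)
def pvStepA (st : Int × Int × Int × Int) (p : Int × Int) : Int × Int × Int × Int :=
  let ma := if st.1 < p.2 then p.2 else st.1
  let pma := if st.1 < p.2 then p.1 + 1 else st.2.2.1
  let mi := if p.2 < st.2.1 then p.2 else st.2.1
  let pmi := if p.2 < st.2.1 then p.1 + 1 else st.2.2.2
  (ma, mi, pma, pmi)

def maior_menor_posicao (lista : List Int) : Int × Int × Int × Int :=
  match lista with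
  | [] => (0, 0, 1, 1)   -- Python A raises IndexError here (lista[0]); outside Pre_
  | h :: _ => (PySem.List.enumerate lista 0).foldl pvStepA (h, h, 1, 1)

-- ===== PORT B =====
def maior_menor_posicao_alt (lista : List Int) : Int × Int × Int × Int :=
  match PySem.List.max? lista (fun x => x), PySem.List.min? lista (fun x => x) with
  | some ma, some mi =>
      (ma, mi,
       (((PySem.List.index? lista ma).getD 0 : Nat) : Int) + 1,
       (((PySem.List.index? lista mi).getD 0 : Nat) : Int) + 1)
  | _, _ => (0, 0, 1, 1)   -- Python B raises ValueError here (max of empty); outside Pre_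

-- ===== PRECONDITION & SPEC =====
-- Pre_ excludes only the empty list, on which A raises IndexError (and B raises ValueError).
def Pre_maior_menor_posicao (lista : List Int) : Prop := lista ≠ []
instance (lista : List Int) : Decidable (Pre_maior_menor_posicao lista) := by unfold Pre_maior_menor_posicao; infer_instance
def pvWitness_maior_menor_posicao : List Int := [3, -1, 4, -1, 5]

def Spec_maior_menor_posicao (lista : List Int) (out : Int × Int × Int × Int) : Prop := out = maior_menor_posicao_alt lista
instance (lista : List Int) (out : Int × Int × Int × Int) : Decidable (Spec_maior_menor_posicao lista out) := by unfold Spec_maior_menor_posicao; infer_instance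

-- ===== CLAIM (what is proved, stated in full; the proofs are below) =====
def Claim_equal_maior_menor_posicao : Prop := ∀ (lista : List Int), Dom_maior_menor_posicao lista → Pre_maior_menor_posicao lista → Spec_maior_menor_posicao lista (maior_menor_posicao lista)

-- ===== LEMMAS AND PROOFS =====

theorem alt_cons (h : Int) (t : List Int) :
    maior_menor_posicao_alt (h :: t) =
      (t.foldl max h, t.foldl min h,
       (((PySem.List.index? (h :: t) (t.foldl max h)).getD 0 : Nat) : Int) + 1,
       (((PySem.List.index? (h :: t) (t.foldl min h)).getD 0 : Nat) : Int) + 1) := by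
  simp [maior_menor_posicao_alt, PySem.List.max?_id_cons, PySem.List.min?_id_cons]

theorem a_snoc (h : Int) (t : List Int) (x : Int) :
    maior_menor_posicao ((h :: t) ++ [x]) =
      pvStepA (maior_menor_posicao (h :: t)) (((h :: t).length : Int), x) := by
  show (PySem.List.enumerate ((h :: t) ++ [x]) 0).foldl pvStepA (h, h, 1, 1) = _
  rw [PySem.List.enumerate_append]
  simp [PySem.List.enumerate_cons, PySem.List.enumerate_nil, List.foldl_append,
    maior_menor_posicao]

theorem mem_le_foldl_max (h : Int) (t : List Int) {y : Int} (hy : y ∈ h :: t) :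
    y ≤ t.foldl max h := by
  rcases List.mem_cons.mp hy with h1 | h1
  · rw [h1]; exact (PySem.List.le_foldl_max t h).1
  · exact (PySem.List.le_foldl_max t h).2 y h1

theorem foldl_min_le_mem (h : Int) (t : List Int) {y : Int} (hy : y ∈ h :: t) :
    t.foldl min h ≤ y := by
  rcases List.mem_cons.mp hy with h1 | h1
  · rw [h1]; exact (PySem.List.foldl_min_le t h).1
  · exact (PySem.List.foldl_min_le t h).2 y h1

theorem foldl_max_mem_cons (h : Int) (t : List Int) : t.foldl max h ∈ h :: t := by
  rcases PySem.List.foldl_max_mem t h with h1 | h1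
  · rw [h1]; exact List.mem_cons_self
  · exact List.mem_cons_of_mem _ h1

theorem foldl_min_mem_cons (h : Int) (t : List Int) : t.foldl min h ∈ h :: t := by
  rcases PySem.List.foldl_min_mem t h with h1 | h1
  · rw [h1]; exact List.mem_cons_self
  · exact List.mem_cons_of_mem _ h1

theorem main_eq : ∀ (l : List Int), l ≠ [] →
    maior_menor_posicao l = maior_menor_posicao_alt l := by
  intro l
  induction l using List.reverseRecOn with
  | nil => intro hne; exact absurd rfl hne
  | append_singleton ys x ih =>
    intro _
    match ys with
    | [] =>
      simp [maior_menor_posicao, maior_menor_posicao_alt,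
        PySem.List.enumerate_cons, PySem.List.enumerate_nil, pvStepA,
        PySem.List.max?_id_cons, PySem.List.min?_id_cons]
    | h :: t =>
      rw [a_snoc, ih (by simp), alt_cons]
      have hM := foldl_max_mem_cons h t
      have hm := foldl_min_mem_cons h t
      rw [List.cons_append, alt_cons]
      have hfmax : (t ++ [x]).foldl max h = max (t.foldl max h) x := by
        rw [List.foldl_append]; rfl
      have hfmin : (t ++ [x]).foldl min h = min (t.foldl min h) x := by
        rw [List.foldl_append]; rfl
      by_cases hx : t.foldl max h < x <;> by_cases hx' : x < t.foldl min h
      ·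
        have hnm : x ∉ h :: t := fun hm => absurd (mem_le_foldl_max h t hm) (by omega)
        have hiM : PySem.List.index? ((h :: t) ++ [x]) x = some (h :: t).length :=
          PySem.List.index?_append_singleton_self (h :: t) x hnm
        simp only [PySem.List.index?_eq_idxOf?, List.cons_append] at hiM
        simp [pvStepA, hx, hx', hfmax, hfmin, max_eq_right (le_of_lt hx),
          min_eq_right (le_of_lt hx'), hiM]
      ·
        have hnm : x ∉ h :: t := fun hm => absurd (mem_le_foldl_max h t hm) (by omega)
        have hiM : PySem.List.index? ((h :: t) ++ [x]) x = some (h :: t).length :=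
          PySem.List.index?_append_singleton_self (h :: t) x hnm
        have him : PySem.List.index? ((h :: t) ++ [x]) (t.foldl min h) =
            PySem.List.index? (h :: t) (t.foldl min h) :=
          PySem.List.index?_append_of_mem _ hm
        simp only [PySem.List.index?_eq_idxOf?, List.cons_append] at hiM him
        simp [pvStepA, hx, hx', hfmax, hfmin, max_eq_right (le_of_lt hx),
          min_eq_left (not_lt.mp hx'), hiM, him]
      ·
        have hnm' : x ∉ h :: t := fun hm => absurd (foldl_min_le_mem h t hm) (by omega)
        have him : PySem.List.index? ((h :: t) ++ [x]) x = some (h :: t).length :=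
          PySem.List.index?_append_singleton_self (h :: t) x hnm'
        have hiM : PySem.List.index? ((h :: t) ++ [x]) (t.foldl max h) =
            PySem.List.index? (h :: t) (t.foldl max h) :=
          PySem.List.index?_append_of_mem _ hM
        simp only [PySem.List.index?_eq_idxOf?, List.cons_append] at hiM him
        simp [pvStepA, hx, hx', hfmax, hfmin, max_eq_left (not_lt.mp hx),
          min_eq_right (le_of_lt hx'), hiM, him]
      ·
        have hiM : PySem.List.index? ((h :: t) ++ [x]) (t.foldl max h) =
            PySem.List.index? (h :: t) (t.foldl max h) :=
          PySem.List.index?_append_of_mem _ hM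
        have him : PySem.List.index? ((h :: t) ++ [x]) (t.foldl min h) =
            PySem.List.index? (h :: t) (t.foldl min h) :=
          PySem.List.index?_append_of_mem _ hm
        simp only [PySem.List.index?_eq_idxOf?, List.cons_append] at hiM him
        simp [pvStepA, hx, hx', hfmax, hfmin, max_eq_left (not_lt.mp hx),
          min_eq_left (not_lt.mp hx'), hiM, him]

-- ===== VERDICT (by name: the statement is the Claim_ definition above) =====
theorem maior_menor_posicao_spec : Claim_equal_maior_menor_posicao := by
  intro lista _ hpre
  unfold Spec_maior_menor_posicao
  exact main_eq lista hpre
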